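-- pv_equiv track=rewrite | github.com/neptune-ai/neptune-fetcher | src/neptune_fetcher/alpha/internal/retrieval/attribute_definitions.py | _union_options
-- ===== SOURCE A (Python) =====
-- from typing import (
--     Any,
--     Generator,
--     Iterable,
--     Optional,
--     Union,
-- )
--
-- def _union_options(options: list[Optional[list[str]]]) -> Optional[list[str]]:
--     result = None
--
--     for option in options:
--         if option is not None:
--             if result is None:
--                 result = []
--             result.extend(option)
--
--     return result
-- ===== SOURCE B (Python) =====
-- from typing import Optional
--
-- def _union_options(options: list[Optional[list[str]]]) -> Optional[list[str]]:
--     # Divide and conquer: union each half recursively, then merge the two results.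
--     n = len(options)
--     if n == 0:
--         return None
--     if n == 1:
--         o = options[0]
--         return None if o is None else list(o)
--     mid = n // 2
--     left = _union_options(options[:mid])
--     right = _union_options(options[mid:])
--     if left is None:
--         return right
--     if right is None:
--         return left
--     return left + right
-- ===== Notes on version B (the rewrite author's own statement) =====
-- stated objective: alternative
-- what changed: Replaces A's left-to-right sentinel-accumulator loop with a divide-and-conquer recursion that unions each half of the list and merges the two optional results.
import Mathlib
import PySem

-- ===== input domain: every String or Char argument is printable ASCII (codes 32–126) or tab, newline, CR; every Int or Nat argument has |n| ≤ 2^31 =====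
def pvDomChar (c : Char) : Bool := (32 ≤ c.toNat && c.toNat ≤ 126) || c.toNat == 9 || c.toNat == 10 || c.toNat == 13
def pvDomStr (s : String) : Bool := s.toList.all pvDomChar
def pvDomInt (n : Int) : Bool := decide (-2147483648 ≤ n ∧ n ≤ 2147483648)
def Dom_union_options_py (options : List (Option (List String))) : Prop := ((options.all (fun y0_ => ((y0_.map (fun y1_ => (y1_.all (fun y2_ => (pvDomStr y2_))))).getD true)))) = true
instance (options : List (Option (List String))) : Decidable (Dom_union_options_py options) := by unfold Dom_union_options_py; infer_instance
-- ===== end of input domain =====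

-- B replaces A's left-to-right sentinel accumulator with a divide-and-conquer union; objective: alternative.

-- ===== PORT A =====
-- A: result starts None; for each non-None option, initialize [] if needed and extend.
def union_options_py (options : List (Option (List String))) : Option (List String) :=
  options.foldl (fun result option =>
    match option with
    | none => result
    | some o => match result with
      | none => some ([] ++ o)
      | some r => some (r ++ o)) none

-- ===== PORT B =====
-- B: split the list in half, union each half recursively, merge the two optional results.
def union_options_py_alt : List (Option (List String)) → Option (List String)
  | [] => none
  | [o] => (match o with | none => none | some l => some l)
  | a :: b :: t =>
      let options := a :: b :: t
      let mid := options.length / 2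
      let left := union_options_py_alt (options.take mid)
      let right := union_options_py_alt (options.drop mid)
      match left with
      | none => right
      | some l =>
        match right with
        | none => some l
        | some r => some (l ++ r)
  termination_by l => l.length
  decreasing_by
    · simp only [List.length_take, List.length_cons]; omega
    · simp only [List.length_drop, List.length_cons]; omega

-- ===== PRECONDITION & SPEC =====
def Spec_union_options_py (options : List (Option (List String))) (out : Option (List String)) : Prop := out = union_options_py_alt options
instance (options : List (Option (List String))) (out : Option (List String)) : Decidable (Spec_union_options_py options out) := by unfold Spec_union_options_py; infer_instance

-- ===== CLAIM (what is proved, stated in full; the proofs are below) =====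
def Claim_equal_union_options_py : Prop := ∀ (options : List (Option (List String))), Dom_union_options_py options → Spec_union_options_py options (union_options_py options)

-- ===== LEMMAS AND PROOFS =====

-- Closed form shared by both proofs: none iff no non-None option, else flatten of them.
def pvUnion (options : List (Option (List String))) : Option (List String) :=
  let present := options.filterMap id
  if present.isEmpty then none else some present.flatten

-- The merge step B performs on two optional results.
def pvMerge (a b : Option (List String)) : Option (List String) :=
  match a with
  | none => b
  | some l => match b with | none => some l | some r => some (l ++ r)

theorem pvUnion_append (xs ys : List (Option (List String))) :
    pvUnion (xs ++ ys) = pvMerge (pvUnion xs) (pvUnion ys) := by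
  simp only [pvUnion, List.filterMap_append]
  cases hx : xs.filterMap id <;> cases hy : ys.filterMap id <;> simp [pvMerge]

-- Invariant: from accumulator `some r`, A's fold returns some (r ++ flatten of remaining non-None options).
theorem pv_fold_some (options : List (Option (List String))) (r : List String) :
    options.foldl (fun result option =>
      match option with
      | none => result
      | some o => match result with
        | none => some ([] ++ o)
        | some r => some (r ++ o)) (some r)
    = some (r ++ (options.filterMap id).flatten) := by
  induction options generalizing r with
  | nil => simp [List.foldl]
  | cons h t ih =>
    cases h with
    | none => simpa [List.foldl] using ih r
    | some o =>
      have h := ih (r ++ o)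
      simp only [List.nil_append] at h
      simp [List.foldl, h]

theorem pv_a_closed (options : List (Option (List String))) :
    union_options_py options = pvUnion options := by
  induction options with
  | nil => rfl
  | cons h t ih =>
    cases h with
    | none =>
      simp only [union_options_py, pvUnion, List.foldl, List.filterMap] at *
      exact ih
    | some o =>
      have h := pv_fold_some t o
      simp only [union_options_py, pvUnion, List.foldl] at h ⊢
      simp only [List.nil_append] at h
      simp [h]

theorem pv_b_closed (options : List (Option (List String))) :
    union_options_py_alt options = pvUnion options := by
  match options with
  | [] => simp [union_options_py_alt, pvUnion]
  | [o] => cases o <;> simp [union_options_py_alt, pvUnion]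
  | a :: b :: t =>
    have ih1 := pv_b_closed ((a :: b :: t).take ((a :: b :: t).length / 2))
    have ih2 := pv_b_closed ((a :: b :: t).drop ((a :: b :: t).length / 2))
    have h := pvUnion_append ((a :: b :: t).take ((a :: b :: t).length / 2))
      ((a :: b :: t).drop ((a :: b :: t).length / 2))
    rw [List.take_append_drop] at h
    rw [union_options_py_alt, ih1, ih2, h]
    simp [pvMerge]
  termination_by options.length
  decreasing_by
    · simp only [List.length_take, List.length_cons]; omega
    · simp only [List.length_drop, List.length_cons]; omega

-- ===== VERDICT (by name: the statement is the Claim_ definition above) =====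
theorem union_options_py_spec : Claim_equal_union_options_py := by
  intro options _
  show union_options_py options = union_options_py_alt options
  rw [pv_a_closed, pv_b_closed]
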